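-- pv_equiv track=rewrite | github.com/acdh-oeaw/prosnet-prefect-pipelines | prosnet-prefect-pipelines/wikidata_index.py | feature_code_postprocessing
-- ===== SOURCE A (Python) =====
-- def feature_code_postprocessing(feature_code):
--     feture_codes_rank = [
--         "PPLC",
--         "PPLCH",
--         "PPLA",
--         "PPLA2",
--         "PPLA3",
--         "PPLA4",
--         "PPL",
--         "PPLF",
--         "PPLG",
--         "PPLH",
--         "PPLL",
--         "PPLQ",
--         "PPLR",
--         "PPLS",
--         "PPLW",
--         "PPLX",
--         "STLMT",
--         "ADM1",
--         "ADM1H",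
--         "ADM2",
--         "ADM2H",
--         "ADM3",
--         "ADM3H",
--         "ADM4",
--         "ADM4H",
--         "ADM5",
--         "ADM5H",
--         "ADMD",
--         "ADMDH",
--     ]
--     codes = feature_code.split()
--     p_a_codes = [
--         code.split(".")[1]
--         for code in codes
--         if (code.startswith("P") or code.startswith("A"))
--     ]
--     if len(p_a_codes) > 0:
--         return min(
--             (s for s in p_a_codes if s in feture_codes_rank),
--             key=feture_codes_rank.index,
--             default=None,
--         )
--
--     elif len(codes) > 0:
--         return codes[0]
--     return None
-- ===== SOURCE B (Python) =====
-- def feature_code_postprocessing(feature_code):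
--     feture_codes_rank = [
--         "PPLC", "PPLCH", "PPLA", "PPLA2", "PPLA3", "PPLA4", "PPL", "PPLF",
--         "PPLG", "PPLH", "PPLL", "PPLQ", "PPLR", "PPLS", "PPLW", "PPLX",
--         "STLMT", "ADM1", "ADM1H", "ADM2", "ADM2H", "ADM3", "ADM3H", "ADM4",
--         "ADM4H", "ADM5", "ADM5H", "ADMD", "ADMDH",
--     ]
--     codes = feature_code.split()
--     if any(c.startswith("P") or c.startswith("A") for c in codes):
--         # walk the priority table top-down and test the tokens directly:
--         # no candidate list, no min(), no .index scans
--         for ranked in feture_codes_rank: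
--             for c in codes:
--                 if (c.startswith("P") or c.startswith("A")) and c.split(".")[1] == ranked:
--                     return ranked
--         return None
--     if codes:
--         return codes[0]
--     return None
-- ===== Notes on version B (the rewrite author's own statement) =====
-- stated objective: alternative
-- what changed: B never builds the candidate list: instead of A's min() over extracted codes keyed by repeated feture_codes_rank.index scans, B walks the ranked table top-down and returns the first rank that some P/A token's after-dot part equals, testing tokens directly.
import Mathlib
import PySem

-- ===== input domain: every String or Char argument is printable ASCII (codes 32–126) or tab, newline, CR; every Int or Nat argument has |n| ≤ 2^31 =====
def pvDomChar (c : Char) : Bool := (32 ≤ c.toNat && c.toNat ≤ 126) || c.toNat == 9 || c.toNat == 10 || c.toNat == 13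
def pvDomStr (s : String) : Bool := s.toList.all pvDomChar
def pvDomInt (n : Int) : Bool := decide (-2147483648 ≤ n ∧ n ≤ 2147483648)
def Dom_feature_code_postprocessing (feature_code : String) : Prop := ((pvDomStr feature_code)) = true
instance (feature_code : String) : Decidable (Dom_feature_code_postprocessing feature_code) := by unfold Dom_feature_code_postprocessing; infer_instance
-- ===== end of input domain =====

-- B drops A's candidate-list + min()-keyed-by-.index machinery and instead walks the ranked
-- table top-down, testing the tokens directly for each rank (objective: alternative algorithm).


-- ===== PORT A =====
-- the module-level literal table feture_codes_rank, as A writes it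
def pvFetureCodesRank : List String :=
  ["PPLC", "PPLCH", "PPLA", "PPLA2", "PPLA3", "PPLA4", "PPL", "PPLF",
   "PPLG", "PPLH", "PPLL", "PPLQ", "PPLR", "PPLS", "PPLW", "PPLX",
   "STLMT", "ADM1", "ADM1H", "ADM2", "ADM2H", "ADM3", "ADM3H", "ADM4",
   "ADM4H", "ADM5", "ADM5H", "ADMD", "ADMDH"]

-- code.split(".")[1]; the IndexError case (no "." in code) is excluded by Pre_, the
-- .getD fallbacks are never reached under Pre_
def pvAfterDot (code : String) : String :=
  (PySem.List.pyGet? ((PySem.Str.split? code ".").getD []) 1).getD ""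

def pvIsPA (code : String) : Bool :=
  PySem.Str.startswith code "P" || PySem.Str.startswith code "A"

def feature_code_postprocessing (feature_code : String) : Option String :=
  let codes := PySem.Str.split₀ feature_code
  let p_a_codes := (codes.filter pvIsPA).map pvAfterDot
  if p_a_codes.length > 0 then
    PySem.List.min? (p_a_codes.filter (fun s => pvFetureCodesRank.contains s))
      (fun s => (PySem.List.index? pvFetureCodesRank s).getD 0)
  else if codes.length > 0 then
    PySem.List.pyGet? codes 0
  else none

-- ===== PORT B =====
-- B's copy of the same module-level literal table
def pvRankTable : List String :=
  ["PPLC", "PPLCH", "PPLA", "PPLA2", "PPLA3", "PPLA4", "PPL", "PPLF",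
   "PPLG", "PPLH", "PPLL", "PPLQ", "PPLR", "PPLS", "PPLW", "PPLX",
   "STLMT", "ADM1", "ADM1H", "ADM2", "ADM2H", "ADM3", "ADM3H", "ADM4",
   "ADM4H", "ADM5", "ADM5H", "ADMD", "ADMDH"]

-- (c.startswith("P") or c.startswith("A")) and c.split(".")[1] == ranked
def pvTokenMatches (ranked c : String) : Bool :=
  (PySem.Str.startswith c "P" || PySem.Str.startswith c "A") &&
  ((PySem.List.pyGet? ((PySem.Str.split? c ".").getD []) 1).getD "" == ranked)

-- the nested 'for ranked in table: for c in codes: … return ranked' loop; None if the table is exhausted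
def pvScanRank (codes : List String) : List String → Option String
  | [] => none
  | ranked :: rest =>
    if codes.any (pvTokenMatches ranked) then some ranked else pvScanRank codes rest

def feature_code_postprocessing_alt (feature_code : String) : Option String :=
  let codes := PySem.Str.split₀ feature_code
  if codes.any (fun c => PySem.Str.startswith c "P" || PySem.Str.startswith c "A") then
    pvScanRank codes pvRankTable
  else
    match codes with
    | [] => none
    | c :: _ => some c

-- ===== PRECONDITION & SPEC =====
-- Pre_ excludes exactly the inputs where some whitespace token starting with "P" or "A"
-- contains no "." : there code.split(".")[1] raises IndexError in A.
def Pre_feature_code_postprocessing (feature_code : String) : Prop :=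
  ∀ code ∈ PySem.Str.split₀ feature_code,
    pvIsPA code = true → PySem.Str.isIn "." code = true
instance (feature_code : String) : Decidable (Pre_feature_code_postprocessing feature_code) := by unfold Pre_feature_code_postprocessing; infer_instance

def pvWitness_feature_code_postprocessing : String := "A.ADM2 xx P.PPLC"

def Spec_feature_code_postprocessing (feature_code : String) (out : Option String) : Prop := out = feature_code_postprocessing_alt feature_code
instance (feature_code : String) (out : Option String) : Decidable (Spec_feature_code_postprocessing feature_code out) := by unfold Spec_feature_code_postprocessing; infer_instance

-- ===== CLAIM (what is proved, stated in full; the proofs are below) =====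
def Claim_equal_feature_code_postprocessing : Prop := ∀ (feature_code : String), Dom_feature_code_postprocessing feature_code → Pre_feature_code_postprocessing feature_code → Spec_feature_code_postprocessing feature_code (feature_code_postprocessing feature_code)

-- ===== LEMMAS AND PROOFS =====

-- the fold step of PySem.List.min? (keep the first strictly smaller key)
def pvMinStep {α : Type} (key : α → Nat) (acc : Option α) (x : α) : Option α :=
  match acc with
  | none => some x
  | some m => if key x < key m then some x else some m

lemma pvMin?_eq_foldl {α : Type} (key : α → Nat) (xs : List α) :
    PySem.List.min? xs key = xs.foldl (pvMinStep key) none := rfl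

-- once the running minimum has key 0 (the least Nat), the fold never replaces it
lemma pvFoldl_min_stable {α : Type} (key : α → Nat) (m : α) (hm : key m = 0) (xs : List α) :
    xs.foldl (pvMinStep key) (some m) = some m := by
  induction xs with
  | nil => rfl
  | cons x t ih => simpa [pvMinStep, hm] using ih

-- if r is in xs and key s = 0 exactly for s = r among xs (and the seed has key ≠ 0),
-- the fold returns r
lemma pvFoldl_min_zero {α : Type} (key : α → Nat) (r : α) (xs : List α) (acc : Option α)
    (hr : r ∈ xs) (hkey : ∀ s ∈ xs, (key s = 0 ↔ s = r))
    (hacc : ∀ m, acc = some m → key m ≠ 0) :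
    xs.foldl (pvMinStep key) acc = some r := by
  induction xs generalizing acc with
  | nil => exact absurd hr (by simp)
  | cons x t ih =>
    rw [List.foldl_cons]
    by_cases hx : x = r
    · subst hx
      have hx0 : key x = 0 := (hkey x (by simp)).2 rfl
      have hstep : pvMinStep key acc x = some x := by
        cases acc with
        | none => rfl
        | some m => simp [pvMinStep, hx0, Nat.pos_of_ne_zero (hacc m rfl)]
      rw [hstep]
      exact pvFoldl_min_stable key x hx0 t
    · have hx0 : key x ≠ 0 := fun h => hx ((hkey x (by simp)).1 h)
      have hr' : r ∈ t := by
        rcases List.mem_cons.1 hr with h | h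
        · exact absurd h.symm hx
        · exact h
      refine ih _ hr' (fun s hs => hkey s (List.mem_cons_of_mem _ hs)) ?_
      intro m hm
      cases acc with
      | none =>
        have : x = m := by simpa [pvMinStep] using hm
        exact this ▸ hx0
      | some m0 =>
        by_cases hc : key x < key m0
        · have : x = m := by simpa [pvMinStep, hc] using hm
          exact this ▸ hx0
        · have : m0 = m := by simpa [pvMinStep, hc] using hm
          exact this ▸ hacc m0 rfl

-- the fold is unchanged by a key that agrees on the list's elements (and the seed)
lemma pvFoldl_min_congr {α : Type} (k1 k2 : α → Nat) (xs : List α) (acc : Option α)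
    (h : ∀ s ∈ xs, k1 s = k2 s) (hacc : ∀ m, acc = some m → k1 m = k2 m) :
    xs.foldl (pvMinStep k1) acc = xs.foldl (pvMinStep k2) acc := by
  induction xs generalizing acc with
  | nil => rfl
  | cons x t ih =>
    have hx := h x (by simp)
    have hstep : pvMinStep k1 acc x = pvMinStep k2 acc x := by
      cases acc with
      | none => rfl
      | some m => simp [pvMinStep, hx, hacc m rfl]
    rw [List.foldl_cons, List.foldl_cons, hstep]
    refine ih _ (fun s hs => h s (List.mem_cons_of_mem _ hs)) ?_
    intro m hm
    cases acc with
    | none =>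
      have : x = m := by simpa [pvMinStep] using hm
      exact this ▸ hx
    | some m0 =>
      by_cases hc : k2 x < k2 m0
      · have : x = m := by simpa [pvMinStep, hc] using hm
        exact this ▸ hx
      · have : m0 = m := by simpa [pvMinStep, hc] using hm
        exact this ▸ hacc m0 rfl

-- shifting every key by +1 does not change the step function
lemma pvMinStep_shift {α : Type} (key : α → Nat) :
    pvMinStep (fun s => key s + 1) = pvMinStep key := by
  funext acc x
  cases acc <;> simp [pvMinStep]

-- A's min-by-rank-index over the candidates equals the first-table-hit scan
lemma pvMain (R P : List String) :
    PySem.List.min? (P.filter (fun s => R.contains s))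
      (fun s => (PySem.List.index? R s).getD 0) =
    R.find? (fun r => P.contains r) := by
  induction R with
  | nil => simp [PySem.List.min?]
  | cons r R' ih =>
    by_cases hr : r ∈ P
    · rw [List.find?_cons_of_pos (by simpa using hr)]
      rw [pvMin?_eq_foldl]
      refine pvFoldl_min_zero _ r _ _ ?_ ?_ (by intro m hm; cases hm)
      · simp [List.mem_filter, hr]
      · intro s hs
        have hsR : s ∈ r :: R' := by simpa using (List.mem_filter.1 hs).2
        constructor
        · intro h0
          by_contra hne
          rw [PySem.List.index?_cons_of_ne R' (fun he => hne he.symm)] at h0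
          have hsR' : s ∈ R' := by
            rcases List.mem_cons.1 hsR with h | h
            · exact absurd h hne
            · exact h
          rcases Option.isSome_iff_exists.1
            ((PySem.List.index?_isSome_iff R' s).2 hsR') with ⟨k, hk⟩
          rw [hk] at h0
          simp at h0
        · intro h; subst h; rw [PySem.List.index?_cons_self]; rfl
    · rw [List.find?_cons_of_neg (by simpa using hr)]
      have hfil : P.filter (fun s => (r :: R').contains s) =
          P.filter (fun s => R'.contains s) := by
        refine List.filter_congr ?_
        intro s hs
        have : s ≠ r := fun h => hr (h ▸ hs)
        simp [this]
      rw [hfil, pvMin?_eq_foldl]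
      rw [pvFoldl_min_congr (fun s => (PySem.List.index? (r :: R') s).getD 0)
        (fun s => (PySem.List.index? R' s).getD 0 + 1) _ none ?hkeys (by intro m hm; cases hm)]
      · rw [pvMinStep_shift, ← pvMin?_eq_foldl]
        exact ih
      case hkeys =>
        intro s hs
        show (PySem.List.index? (r :: R') s).getD 0 = (PySem.List.index? R' s).getD 0 + 1
        have hsR' : s ∈ R' := by simpa using (List.mem_filter.1 hs).2
        have hne : r ≠ s := fun h => hr (h ▸ (List.mem_filter.1 hs).1)
        rw [PySem.List.index?_cons_of_ne R' hne]
        rcases Option.isSome_iff_exists.1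
          ((PySem.List.index?_isSome_iff R' s).2 hsR') with ⟨k, hk⟩
        rw [hk]; rfl

-- B's inner token scan decides membership of r in A's candidate list
lemma pvAny_eq_contains (codes : List String) (r : String) :
    codes.any (pvTokenMatches r) =
    ((codes.filter pvIsPA).map pvAfterDot).contains r := by
  induction codes with
  | nil => rfl
  | cons c t ih =>
    by_cases hc : pvIsPA c = true
    · have hm : pvTokenMatches r c = (pvAfterDot c == r) := by
        unfold pvTokenMatches pvAfterDot
        unfold pvIsPA at hc
        rw [hc, Bool.true_and]
      simp only [List.any_cons, List.filter_cons_of_pos hc, List.map_cons,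
        List.contains_cons, hm, ih]
      have : (pvAfterDot c == r) = (r == pvAfterDot c) := by
        rw [Bool.eq_iff_iff]; simp only [beq_iff_eq]; exact eq_comm
      rw [this]
    · have hm : pvTokenMatches r c = false := by
        unfold pvTokenMatches
        unfold pvIsPA at hc
        rw [Bool.eq_false_iff.2 hc, Bool.false_and]
      simp only [List.any_cons, List.filter_cons_of_neg hc, hm, Bool.false_or, ih]

-- B's table walk is find? over the table against A's candidate list
lemma pvScan_eq_find (codes : List String) (R : List String) :
    pvScanRank codes R = R.find? (fun r => ((codes.filter pvIsPA).map pvAfterDot).contains r) := by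
  induction R with
  | nil => rfl
  | cons r rest ih =>
    unfold pvScanRank
    rw [pvAny_eq_contains, ih]
    by_cases h : ((codes.filter pvIsPA).map pvAfterDot).contains r = true
    · rw [if_pos h, List.find?_cons_of_pos h]
    · rw [if_neg h, List.find?_cons_of_neg h]

-- the two branch conditions agree
lemma pvCond_eq (codes : List String) :
    (codes.any (fun c => PySem.Str.startswith c "P" || PySem.Str.startswith c "A") = true) ↔
    ((codes.filter pvIsPA).map pvAfterDot).length > 0 := by
  have : (fun c => PySem.Str.startswith c "P" || PySem.Str.startswith c "A") = pvIsPA := rfl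
  rw [this, List.length_map, List.any_eq_true]
  constructor
  · rintro ⟨c, hc, hpa⟩
    exact List.length_pos_iff.2 (fun h => by
      have := List.mem_filter.2 ⟨hc, hpa⟩
      rw [h] at this; simp at this)
  · intro h
    rcases List.exists_mem_of_ne_nil _ (List.length_pos_iff.1 h) with ⟨c, hc⟩
    exact ⟨c, (List.mem_filter.1 hc).1, (List.mem_filter.1 hc).2⟩

-- ===== VERDICT (by name: the statement is the Claim_ definition above) =====
theorem feature_code_postprocessing_spec : Claim_equal_feature_code_postprocessing := by
  intro feature_code _hdom _hpre
  unfold Spec_feature_code_postprocessing feature_code_postprocessing feature_code_postprocessing_alt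
  simp only []
  generalize PySem.Str.split₀ feature_code = codes
  by_cases h : codes.any (fun c => PySem.Str.startswith c "P" || PySem.Str.startswith c "A") = true
  · rw [if_pos ((pvCond_eq codes).1 h), if_pos h, pvScan_eq_find]
    exact pvMain pvRankTable ((codes.filter pvIsPA).map pvAfterDot)
  · rw [if_neg (fun hl => h ((pvCond_eq codes).2 hl)), if_neg h]
    cases codes with
    | nil => rfl
    | cons c t => simp [PySem.List.pyGet?, PySem.List.pyIdx?]
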